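-- pv_equiv track=rewrite | github.com/CCcassiusdjs/Systems_Security | main.py | calcular_chave_otimizada
-- ===== SOURCE A (Python) =====
-- from collections import Counter
--
-- def calcular_chave_otimizada(texto_cifrado, tamanho_chave, frequencia_idioma):
--     chave_otimizada = ''
--     for i in range(tamanho_chave):
--         segmento = texto_cifrado[i::tamanho_chave]
--         contador = Counter(segmento)
--         letra_mais_frequente = max(contador, key=contador.get)
--         deslocamento = ord(letra_mais_frequente) - ord('e')  # 'e' é geralmente a letra mais frequente
--         chave_otimizada += chr((deslocamento + 26) % 26 + ord('a'))
--     return chave_otimizada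
-- ===== SOURCE B (Python) =====
-- def calcular_chave_otimizada(texto_cifrado, tamanho_chave, frequencia_idioma):
--     # One pass over the ciphertext bucketing char counts per key position,
--     # then derive each key letter from its bucket (instead of per-position slicing).
--     if tamanho_chave <= 0:
--         return ''
--     buckets = [{} for _ in range(tamanho_chave)]
--     for idx, ch in enumerate(texto_cifrado):
--         b = buckets[idx % tamanho_chave]
--         b[ch] = b.get(ch, 0) + 1
--     out = []
--     for b in buckets:
--         letra = max(b, key=b.get)
--         out.append(chr((ord(letra) - ord('e') + 26) % 26 + ord('a')))
--     return ''.join(out)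
-- ===== Notes on version B (the rewrite author's own statement) =====
-- stated objective: alternative
-- what changed: B replaces A's per-key-position slicing (one slice + Counter per position) by a single bucketing pass over enumerate(texto_cifrado) into tamanho_chave per-position count dicts, then a separate derive phase over the buckets.
import Mathlib
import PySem

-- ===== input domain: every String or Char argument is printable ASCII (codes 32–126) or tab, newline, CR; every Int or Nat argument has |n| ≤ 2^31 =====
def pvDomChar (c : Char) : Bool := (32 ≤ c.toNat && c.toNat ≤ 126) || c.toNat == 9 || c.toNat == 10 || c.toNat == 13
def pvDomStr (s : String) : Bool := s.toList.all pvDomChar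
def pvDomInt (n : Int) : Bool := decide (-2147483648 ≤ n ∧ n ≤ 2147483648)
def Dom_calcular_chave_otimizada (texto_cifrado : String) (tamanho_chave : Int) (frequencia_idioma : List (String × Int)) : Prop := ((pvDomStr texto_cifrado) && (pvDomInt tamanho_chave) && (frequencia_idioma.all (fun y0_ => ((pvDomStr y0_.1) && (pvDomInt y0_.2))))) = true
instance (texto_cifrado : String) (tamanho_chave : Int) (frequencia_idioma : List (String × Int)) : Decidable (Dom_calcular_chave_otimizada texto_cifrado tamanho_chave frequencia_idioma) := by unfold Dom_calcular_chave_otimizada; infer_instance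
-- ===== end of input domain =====

-- B replaces A's per-key-position slicing by one bucketing pass over the whole
-- ciphertext followed by a derive phase over the buckets (objective: alternative decomposition).

-- ===== PORT A =====
def calcular_chave_otimizada (texto_cifrado : String) (tamanho_chave : Int) (frequencia_idioma : List (String × Int)) : String :=
  let chave_otimizada : List Char :=
    (PySem.List.pyRange 0 tamanho_chave 1).foldl (fun chave i =>
      let segmento : List Char :=
        (PySem.List.slice? texto_cifrado.toList (some i) none tamanho_chave).getD []   -- texto_cifrado[i::tamanho_chave]
      let contador := PySem.Dict.counter segmento                                      -- Counter(segmento)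
      match PySem.List.max? contador.keys (fun c => contador.getD c 0) with            -- max(contador, key=contador.get)
      | none => chave   -- Python: max() of an empty Counter raises ValueError; excluded by Pre_
      | some letra_mais_frequente =>
        let deslocamento : Int := (letra_mais_frequente.toNat : Int) - 101             -- ord(letra) - ord('e')
        chave ++ [Char.ofNat ((PySem.Int.mod (deslocamento + 26) 26).toNat + 97)]      -- chr((d+26)%26 + ord('a'))
      ) []
  String.ofList chave_otimizada

-- ===== PORT B =====
def calcular_chave_otimizada_alt (texto_cifrado : String) (tamanho_chave : Int) (frequencia_idioma : List (String × Int)) : String :=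
  if tamanho_chave ≤ 0 then "" else
  let buckets0 : List (PySem.Dict Char Int) :=
    (PySem.List.pyRange 0 tamanho_chave 1).map (fun _ => PySem.Dict.empty)             -- [{} for _ in range(k)]
  let buckets :=
    (PySem.List.enumerate texto_cifrado.toList 0).foldl (fun bs p =>
      let j := PySem.Int.mod p.1 tamanho_chave                                         -- idx % tamanho_chave
      let b := PySem.List.pyGetD bs j PySem.Dict.empty                                 -- buckets[idx % k]
      PySem.List.pySetD bs j (b.insert p.2 (b.getD p.2 0 + 1))) buckets0               -- b[ch] = b.get(ch, 0) + 1
  let out : List Char :=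
    buckets.foldl (fun out b =>
      match PySem.List.max? b.keys (fun c => b.getD c 0) with                          -- max(b, key=b.get)
      | none => out   -- Python: max() of an empty dict raises ValueError; excluded by Pre_
      | some letra =>
        out ++ [Char.ofNat ((PySem.Int.mod ((letra.toNat : Int) - 101 + 26) 26).toNat + 97)]) []
  String.ofList out

-- ===== PRECONDITION & SPEC =====
-- Pre_ excludes exactly the inputs on which the Python A raises ValueError (max() of an
-- empty Counter): 0 < tamanho_chave together with len(texto_cifrado) < tamanho_chave.
-- (Both Pythons raise there; the two ports still agree everywhere, the proof below does not need Pre_.)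
def Pre_calcular_chave_otimizada (texto_cifrado : String) (tamanho_chave : Int) (frequencia_idioma : List (String × Int)) : Prop :=
  tamanho_chave ≤ 0 ∨ tamanho_chave ≤ (texto_cifrado.toList.length : Int)
instance (texto_cifrado : String) (tamanho_chave : Int) (frequencia_idioma : List (String × Int)) : Decidable (Pre_calcular_chave_otimizada texto_cifrado tamanho_chave frequencia_idioma) := by unfold Pre_calcular_chave_otimizada; infer_instance

def pvWitness_calcular_chave_otimizada : String × Int × (List (String × Int)) := ("abbab", 2, [])

def Spec_calcular_chave_otimizada (texto_cifrado : String) (tamanho_chave : Int) (frequencia_idioma : List (String × Int)) (out : String) : Prop := out = calcular_chave_otimizada_alt texto_cifrado tamanho_chave frequencia_idioma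
instance (texto_cifrado : String) (tamanho_chave : Int) (frequencia_idioma : List (String × Int)) (out : String) : Decidable (Spec_calcular_chave_otimizada texto_cifrado tamanho_chave frequencia_idioma out) := by unfold Spec_calcular_chave_otimizada; infer_instance

-- ===== CLAIM (what is proved, stated in full; the proofs are below) =====
def Claim_equal_calcular_chave_otimizada : Prop := ∀ (texto_cifrado : String) (tamanho_chave : Int) (frequencia_idioma : List (String × Int)), Dom_calcular_chave_otimizada texto_cifrado tamanho_chave frequencia_idioma → Pre_calcular_chave_otimizada texto_cifrado tamanho_chave frequencia_idioma → Spec_calcular_chave_otimizada texto_cifrado tamanho_chave frequencia_idioma (calcular_chave_otimizada texto_cifrado tamanho_chave frequencia_idioma)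

-- ===== LEMMAS AND PROOFS =====

-- the common spec of one residue class: pick l[i], then every (k'+1)-th element after it
def resid (l : List Char) (i k' : Nat) : List Char :=
  match h : l[i]? with
  | none => []
  | some x => x :: resid l (i + k' + 1) k'
termination_by l.length - i
decreasing_by
  have : i < l.length := (List.getElem?_eq_some_iff.mp h).1
  omega

theorem resid_of_none {l : List Char} {i k' : Nat} (h : l[i]? = none) : resid l i k' = [] := by
  rw [resid, h]

theorem resid_of_some {l : List Char} {i k' : Nat} {x : Char} (h : l[i]? = some x) :
    resid l i k' = x :: resid l (i + k' + 1) k' := by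
  rw [resid, h]

theorem resid_cons_succ (x : Char) (t : List Char) (d k' : Nat) :
    resid (x :: t) (d + 1) k' = resid t d k' := by
  cases h : t[d]? with
  | none =>
    rw [resid_of_none (by simpa using h), resid_of_none h]
  | some y =>
    rw [resid_of_some (x := y) (by simpa using h), resid_of_some h]
    have : d + 1 + k' + 1 = (d + k' + 1) + 1 := by omega
    rw [this, resid_cons_succ x t (d + k' + 1) k']
termination_by t.length - d
decreasing_by
  have : d < t.length := (List.getElem?_eq_some_iff.mp h).1
  omega

theorem resid_cons_zero (x : Char) (t : List Char) (k' : Nat) :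
    resid (x :: t) 0 k' = x :: resid t k' k' := by
  rw [resid_of_some (x := x) rfl]
  have : 0 + k' + 1 = k' + 1 := by omega
  rw [this, resid_cons_succ]

-- the filterMap produced by slice? equals resid, for any large enough range bound
theorem strideG (l : List Char) (k' : Nat) :
    ∀ (M i : Nat), l.length ≤ i + (k' + 1) * M →
      (List.range M).filterMap (fun j => l[i + (k' + 1) * j]?) = resid l i k' := by
  intro M
  induction M with
  | zero =>
    intro i h
    simp only [List.range_zero, List.filterMap_nil]
    have : l[i]? = none := by
      apply List.getElem?_eq_none
      omega
    rw [resid_of_none this]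
  | succ M ih =>
    intro i h
    rw [List.range_succ_eq_map, List.filterMap_cons, List.filterMap_map]
    cases hx : l[i]? with
    | none =>
      have hlen : l.length ≤ i := List.getElem?_eq_none_iff.mp hx
      simp only [Nat.mul_zero, Nat.add_zero, hx]
      have h2 : (List.range M).filterMap ((fun j => l[i + (k' + 1) * j]?) ∘ Nat.succ) = [] := by
        apply List.filterMap_eq_nil_iff.mpr
        intro j hj
        apply List.getElem?_eq_none
        omega
      rw [h2, resid_of_none hx]
    | some x =>
      simp only [Nat.mul_zero, Nat.add_zero, hx]
      rw [resid_of_some hx]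
      congr 1
      have hcomp : ((fun j => l[i + (k' + 1) * j]?) ∘ Nat.succ) = (fun j => l[(i + k' + 1) + (k' + 1) * j]?) := by
        funext j
        simp only [Function.comp]
        congr 1
        simp [Nat.succ_eq_add_one]
        ring
      rw [hcomp]
      apply ih (i + k' + 1)
      have : (k' + 1) * (M + 1) = (k' + 1) * M + k' + 1 := by ring
      omega

-- Python's xs[i::k] (0 ≤ i, 0 < k) is exactly resid
theorem slice_getD_eq_resid (l : List Char) (i k : Int) (hi : 0 ≤ i) (hk : 0 < k) :
    (PySem.List.slice? l (some i) none k).getD [] = resid l i.toNat (k.toNat - 1) := by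
  have hk0 : k ≠ 0 := by omega
  simp only [PySem.List.slice?, PySem.List.sliceIndices, if_neg hk0, if_neg (by omega : ¬ k < 0),
    if_neg (by omega : ¬ i < 0), if_pos hk, Option.getD_some]
  by_cases hilen : i < (l.length : Int)
  · rw [min_eq_left (by omega), if_pos (by omega)]
    have hks : k = (k.toNat : Int) := by omega
    have hfun : (fun x : Nat => l[(i + k * (x:Int)).toNat]?) = (fun j : Nat => l[i.toNat + ((k.toNat - 1) + 1) * j]?) := by
      funext j
      congr 1
      have h1 : k * (j:Int) = ((k.toNat * j : Nat) : Int) := by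
        push_cast [Int.toNat_of_nonneg (le_of_lt hk)]; ring
      have h2 : (k.toNat - 1) + 1 = k.toNat := by omega
      rw [h1, h2]
      omega
    rw [hfun]
    apply strideG
    have h2 : (k.toNat - 1) + 1 = k.toNat := by omega
    rw [h2]
    set q : Int := (↑l.length - i + k - 1) / k with hq
    have hnum : (0:Int) ≤ ↑l.length - i + k - 1 := by omega
    have hqnn : 0 ≤ q := Int.ediv_nonneg hnum (by omega)
    have hdm := Int.ediv_add_emod (↑l.length - i + k - 1) k
    have hml := Int.emod_lt_of_pos (↑l.length - i + k - 1) hk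
    have hmn := Int.emod_nonneg (↑l.length - i + k - 1) (by omega : k ≠ 0)
    zify
    rw [Int.toNat_of_nonneg hqnn, Int.toNat_of_nonneg hi, ← hks]
    linarith
  · rw [min_eq_right (by omega), if_neg (by omega)]
    simp only [List.range_zero, List.filterMap_nil]
    rw [resid_of_none (List.getElem?_eq_none (by omega))]

theorem emod_pred (k a : Int) (hk : 0 < k) :
    (a - 1) % k = if a % k = 0 then k - 1 else a % k - 1 := by
  have hmn := Int.emod_nonneg a (by omega : k ≠ 0)
  have hml := Int.emod_lt_of_pos a hk
  have hrepr : a - 1 = (a % k - 1) + k * (a / k) := by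
    have := Int.ediv_add_emod a k
    omega
  rw [hrepr, Int.add_mul_emod_self_left]
  by_cases h0 : a % k = 0
  · rw [if_pos h0, h0]
    have : (0 - 1 : Int) = (k - 1) - k := by ring
    rw [this, Int.sub_emod_right, Int.emod_eq_of_lt (by omega) (by omega)]
  · rw [if_neg h0, Int.emod_eq_of_lt (by omega) (by omega)]

-- the subsequence of l at the positions p (counted from offset s) with (s+p) % k = i
def rFrom (k : Int) (l : List Char) (s i : Int) : List Char :=
  match l with
  | [] => []
  | x :: t => (if s % k = i then [x] else []) ++ rFrom k t (s + 1) i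

theorem rFrom_eq_resid (k : Int) (hk : 0 < k) (i : Int) (hi : 0 ≤ i) (hik : i < k) :
    ∀ (l : List Char) (s : Int), rFrom k l s i = resid l ((i - s) % k).toNat (k.toNat - 1) := by
  intro l
  induction l with
  | nil =>
    intro s
    rw [rFrom, resid_of_none (by simp)]
  | cons x t ih =>
    intro s
    have hmn := Int.emod_nonneg (i - s) (by omega : k ≠ 0)
    have hml := Int.emod_lt_of_pos (i - s) hk
    have hpred : (i - (s + 1)) % k = if (i - s) % k = 0 then k - 1 else (i - s) % k - 1 := by
      have : i - (s + 1) = (i - s) - 1 := by ring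
      rw [this, emod_pred _ _ hk]
    have hiff : s % k = i ↔ (i - s) % k = 0 := by
      constructor
      · intro h
        have hieq : i % k = i := Int.emod_eq_of_lt hi hik
        rw [Int.sub_emod, hieq, h, sub_self, Int.zero_emod]
      · intro h
        have hieq : i % k = i := Int.emod_eq_of_lt hi hik
        have := Int.sub_emod i s k
        rw [h, hieq] at this
        have hs := Int.emod_nonneg s (by omega : k ≠ 0)
        have hsl := Int.emod_lt_of_pos s hk
        have h2 : (i - s % k) % k = 0 := by omega
        have h3 : i - s % k = (i - s % k) % k + k * ((i - s % k) / k) := by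
          have := Int.ediv_add_emod (i - s % k) k
          omega
        rw [h2] at h3
        have h4 : (i - s % k) / k = 0 := by
          by_contra h5
          rcases lt_or_gt_of_ne h5 with h6 | h6
          · nlinarith
          · nlinarith
        rw [h4, mul_zero] at h3
        omega
    rw [rFrom]
    by_cases hc : s % k = i
    · rw [if_pos hc]
      rw [hiff.mp hc] at hpred ⊢
      simp only [Int.toNat_zero]
      rw [resid_cons_zero, ih (s + 1), hpred, if_pos rfl]
      have h9 : (k - 1).toNat = k.toNat - 1 := by omega
      rw [h9]
      rfl
    · rw [if_neg hc, List.nil_append]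
      have h0 : (i - s) % k ≠ 0 := fun h => hc (hiff.mpr h)
      have hd : ((i - s) % k).toNat = (((i - s) % k - 1).toNat) + 1 := by omega
      rw [ih (s + 1), hpred, if_neg h0, hd, resid_cons_succ]

theorem fmod_eq_emod_of_pos (a k : Int) (hk : 0 < k) : PySem.Int.mod a k = a % k := by
  show a.fmod k = a % k
  rw [Int.fmod_eq_emod, if_pos (Or.inl (le_of_lt hk)), add_zero]

theorem pySetD_eq_set {α : Type} (bs : List α) (j : Int) (v : α) (h0 : 0 ≤ j)
    (h1 : j < (bs.length : Int)) : PySem.List.pySetD bs j v = bs.set j.toNat v := by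
  simp only [PySem.List.pySetD, PySem.List.pySet?, PySem.List.pyIdx?, if_pos h0, if_pos h1,
    Option.map_some, Option.getD_some]

-- B's bucketing pass, bucket by bucket: bucket i accumulates exactly rFrom _ l s i
theorem buckets_inv (k : Int) (hk : 0 < k) :
    ∀ (l : List Char) (s : Int) (bs : List (PySem.Dict Char Int)), bs.length = k.toNat →
      (PySem.List.enumerate l s).foldl
        (fun bs p => PySem.List.pySetD bs (PySem.Int.mod p.1 k)
          ((PySem.List.pyGetD bs (PySem.Int.mod p.1 k) PySem.Dict.empty).insert p.2
            ((PySem.List.pyGetD bs (PySem.Int.mod p.1 k) PySem.Dict.empty).getD p.2 0 + 1))) bs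
      = (List.range k.toNat).map (fun (i : Nat) =>
          (rFrom k l s (i : Int)).foldl (fun d c => d.modify c 0 (fun v => v + 1))
            (bs.getD i PySem.Dict.empty)) := by
  intro l
  induction l with
  | nil =>
    intro s bs hlen
    show bs = _
    apply List.ext_getElem
    · simp [hlen]
    · intro n h1 h2
      simp only [List.getElem_map, List.getElem_range, rFrom, List.foldl_nil]
      rw [List.getD_eq_getElem bs PySem.Dict.empty (by omega)]
  | cons x t ih =>
    intro s bs hlen
    rw [PySem.List.enumerate_cons, List.foldl_cons]
    have hsk0 : 0 ≤ s % k := Int.emod_nonneg s (by omega)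
    have hskl : s % k < k := Int.emod_lt_of_pos s hk
    have hmod : PySem.Int.mod s k = s % k := fmod_eq_emod_of_pos s k hk
    set m : Nat := (s % k).toNat with hm
    have hmlt : m < k.toNat := by omega
    have hcast : s % k = (m : Int) := by omega
    have hget : PySem.List.pyGetD bs (PySem.Int.mod s k) PySem.Dict.empty = bs.getD m PySem.Dict.empty := by
      rw [hmod, hcast, PySem.List.pyGetD_natCast]
    set b := bs.getD m PySem.Dict.empty with hb
    have hset : PySem.List.pySetD bs (PySem.Int.mod s k) (b.insert x (b.getD x 0 + 1))
        = bs.set m (b.insert x (b.getD x 0 + 1)) := by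
      rw [hmod, pySetD_eq_set bs _ _ hsk0 (by omega), hcast, Int.toNat_natCast]
    simp only [hget, hset]
    rw [ih (s + 1) _ (by simpa using hlen)]
    apply List.map_congr_left
    intro i hi
    have hilt : i < k.toNat := List.mem_range.mp hi
    rw [rFrom]
    by_cases hc : s % k = (i : Int)
    · have hmi : m = i := by omega
      rw [if_pos hc, List.cons_append, List.nil_append, List.foldl_cons]
      have hgd : (bs.set m (b.insert x (b.getD x 0 + 1))).getD i PySem.Dict.empty
          = b.insert x (b.getD x 0 + 1) := by
        rw [List.getD_eq_getElem?_getD, List.getElem?_set, if_pos hmi, if_pos (by omega)]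
        rfl
      rw [hgd, hb, hmi]
      rfl
    · have hmi : m ≠ i := by omega
      rw [if_neg hc, List.nil_append]
      have hgd : (bs.set m (b.insert x (b.getD x 0 + 1))).getD i PySem.Dict.empty
          = bs.getD i PySem.Dict.empty := by
        rw [List.getD_eq_getElem?_getD, List.getElem?_set, if_neg hmi, ← List.getD_eq_getElem?_getD]
      rw [hgd]

theorem foldl_append_g {β : Type} (g : β → List Char) :
    ∀ (xs : List β) (init : List Char),
      xs.foldl (fun a x => a ++ g x) init = init ++ xs.flatMap g := by
  intro xs
  induction xs with
  | nil => intro init; simp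
  | cons x t ih =>
    intro init
    rw [List.foldl_cons, ih, List.flatMap_cons, List.append_assoc]

-- the shared derive phase: most frequent letter of a bucket → key letter
def deriveG (d : PySem.Dict Char Int) : List Char :=
  match PySem.List.max? d.keys (fun c => d.getD c 0) with
  | none => []
  | some letra => [Char.ofNat ((PySem.Int.mod ((letra.toNat : Int) - 101 + 26) 26).toNat + 97)]

-- ===== VERDICT (by name: the statement is the Claim_ definition above) =====
theorem calcular_chave_otimizada_spec : Claim_equal_calcular_chave_otimizada := by
  intro texto_cifrado tamanho_chave frequencia_idioma _ _
  unfold Spec_calcular_chave_otimizada calcular_chave_otimizada calcular_chave_otimizada_alt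
  by_cases hk : tamanho_chave ≤ 0
  · rw [if_pos hk, PySem.List.pyRange_one_eq_nil hk]
    rfl
  · rw [if_neg hk]
    have hkpos : 0 < tamanho_chave := by omega
    set k := tamanho_chave
    set l := texto_cifrado.toList
    -- A's loop body, rewritten through deriveG
    have hbodyA : (fun (chave : List Char) (i : Int) =>
        match PySem.List.max? (PySem.Dict.counter ((PySem.List.slice? l (some i) none k).getD [])).keys
            (fun c => (PySem.Dict.counter ((PySem.List.slice? l (some i) none k).getD [])).getD c 0) with
        | none => chave
        | some letra =>
          chave ++ [Char.ofNat ((PySem.Int.mod (((letra.toNat : Int) - 101) + 26) 26).toNat + 97)])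
        = (fun chave i => chave ++ deriveG (PySem.Dict.counter ((PySem.List.slice? l (some i) none k).getD []))) := by
      funext chave i
      unfold deriveG
      cases PySem.List.max? (PySem.Dict.counter ((PySem.List.slice? l (some i) none k).getD [])).keys
          (fun c => (PySem.Dict.counter ((PySem.List.slice? l (some i) none k).getD [])).getD c 0) with
      | none => simp
      | some letra => simp
    -- B's derive loop body, rewritten through deriveG
    have hbodyB : (fun (out : List Char) (b : PySem.Dict Char Int) =>
        match PySem.List.max? b.keys (fun c => b.getD c 0) with
        | none => out
        | some letra =>
          out ++ [Char.ofNat ((PySem.Int.mod ((letra.toNat : Int) - 101 + 26) 26).toNat + 97)])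
        = (fun out b => out ++ deriveG b) := by
      funext out b
      unfold deriveG
      cases PySem.List.max? b.keys (fun c => b.getD c 0) with
      | none => simp
      | some letra => simp
    show String.ofList _ = String.ofList _
    congr 1
    rw [hbodyA, hbodyB, foldl_append_g, foldl_append_g, List.nil_append, List.nil_append]
    -- B's buckets
    have hlen0 : ((PySem.List.pyRange 0 k 1).map
        (fun _ => (PySem.Dict.empty : PySem.Dict Char Int))).length = k.toNat := by
      rw [List.length_map, PySem.List.length_pyRange_one]
      omega
    rw [buckets_inv k hkpos l 0 _ hlen0]
    have hgd0 : ∀ i : Nat, ((PySem.List.pyRange 0 k 1).map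
        (fun _ => (PySem.Dict.empty : PySem.Dict Char Int))).getD i PySem.Dict.empty
        = PySem.Dict.empty := by
      intro i
      rw [List.getD_eq_getElem?_getD]
      cases h : ((PySem.List.pyRange 0 k 1).map (fun _ => (PySem.Dict.empty : PySem.Dict Char Int)))[i]? with
      | none => rfl
      | some d =>
        have := List.mem_of_getElem? h
        simp only [List.mem_map] at this
        obtain ⟨_, _, hd⟩ := this
        simp [← hd]
    simp only [hgd0]
    -- A's range loop
    rw [PySem.List.pyRange_one 0 k, show k - 0 = k from by ring, List.flatMap_map, List.flatMap_map]
    apply List.flatMap_congr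
    intro j hj
    have hjlt : j < k.toNat := by
      have := List.mem_range.mp hj
      omega
    have hjk : (j : Int) < k := by omega
    rw [slice_getD_eq_resid l (0 + (j:Int)) k (by omega) hkpos]
    rw [rFrom_eq_resid k hkpos (j : Int) (by omega) hjk l 0]
    rw [← PySem.Dict.counter_eq_foldl]
    have h1 : ((j:Int) - 0) % k = (j:Int) := by
      rw [show (j:Int) - 0 = (j:Int) from by ring, Int.emod_eq_of_lt (by omega) hjk]
    rw [h1, zero_add]
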